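-- pv_equiv track=rewrite | github.com/ohy1023/pythonAlgorithm | likelion/MockExam.py | solution
-- ===== SOURCE A (Python) =====
-- def solution(answers):
--     firstStudent = [1,2,3,4,5]
--     secondStudent = [2,1,2,3,2,4,2,5]
--     thirdStudent = [3,3,1,1,2,2,4,4,5,5]
--     score = [0, 0, 0]
--     result = []
--
--     for idx, answer in enumerate(answers):
--         if answer == firstStudent[idx%len(firstStudent)]:
--             score[0] += 1
--         if answer == secondStudent[idx%len(secondStudent)]:
--             score[1] += 1
--         if answer == thirdStudent[idx%len(thirdStudent)]:
--             score[2] += 1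
--
--     for idx, s in enumerate(score):
--         if s == max(score):
--             result.append(idx+1)
--
--     return result
-- ===== SOURCE B (Python) =====
-- from collections import Counter
--
--
-- def solution(answers):
--     # 40 = lcm(5, 8, 10): i % 40 determines i % len(pattern) for all three patterns,
--     # so a single histogram keyed by (position residue mod 40, answer) suffices.
--     patterns = [[1, 2, 3, 4, 5],
--                 [2, 1, 2, 3, 2, 4, 2, 5],
--                 [3, 3, 1, 1, 2, 2, 4, 4, 5, 5]]
--     cnt = Counter((i % 40, a) for i, a in enumerate(answers))
--     score = [sum(cnt[(r, pat[r % len(pat)])] for r in range(40))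
--              for pat in patterns]
--     best = max(score)
--     return [i + 1 for i, s in enumerate(score) if s == best]
-- ===== Notes on version B (the rewrite author's own statement) =====
-- stated objective: alternative
-- what changed: A compares every answer against all three patterns in one interleaved loop; B builds a Counter histogram keyed by (index mod 40, answer) in one pass (40 = lcm of the pattern lengths) and then derives each score from 40 table lookups per pattern, with a comprehension picking the winners.
import Mathlib
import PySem

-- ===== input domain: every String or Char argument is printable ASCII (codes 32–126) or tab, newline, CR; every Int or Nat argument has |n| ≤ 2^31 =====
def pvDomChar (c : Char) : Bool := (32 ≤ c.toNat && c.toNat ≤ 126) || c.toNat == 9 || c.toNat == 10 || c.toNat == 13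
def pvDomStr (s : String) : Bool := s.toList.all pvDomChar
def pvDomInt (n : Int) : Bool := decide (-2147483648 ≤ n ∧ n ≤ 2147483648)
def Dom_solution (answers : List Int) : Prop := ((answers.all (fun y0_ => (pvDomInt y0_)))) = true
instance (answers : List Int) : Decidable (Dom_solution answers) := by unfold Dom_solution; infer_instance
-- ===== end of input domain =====

-- B replaces A's interleaved compare-each-answer-to-each-pattern loop by a residue
-- histogram: one Counter keyed by (index mod 40, answer), scores read off by table
-- lookups (objective: alternative; same O(n) cost).

-- ===== PORT A =====
-- the three fixed answer patterns (shared literals of both Pythons)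
def pvFirstStudent : List Int := [1, 2, 3, 4, 5]
def pvSecondStudent : List Int := [2, 1, 2, 3, 2, 4, 2, 5]
def pvThirdStudent : List Int := [3, 3, 1, 1, 2, 2, 4, 4, 5, 5]

-- A's first loop: one pass over `enumerate(answers)` updating the three scores together.
-- The enumerate index is 0,1,2,…, so a Nat index with Nat mod is exact for `idx%len`,
-- and `idx % len < len`, so `getD _ 0` is exactly Python's in-range indexing.
def pvLoopA : List Int → Nat → Int × Int × Int → Int × Int × Int
  | [], _, s => s
  | a :: rest, idx, (s1, s2, s3) =>
      pvLoopA rest (idx + 1)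
        ((if a = pvFirstStudent.getD (idx % pvFirstStudent.length) 0 then s1 + 1 else s1),
         (if a = pvSecondStudent.getD (idx % pvSecondStudent.length) 0 then s2 + 1 else s2),
         (if a = pvThirdStudent.getD (idx % pvThirdStudent.length) 0 then s3 + 1 else s3))

-- A's second loop: for idx, s in enumerate(score): if s == max(score): result.append(idx+1)
def pvResLoop : List (Nat × Int) → Int → List Int → List Int
  | [], _, r => r
  | (i, s) :: rest, m, r =>
      pvResLoop rest m (if s = m then r ++ [(i : Int) + 1] else r)

def solution (answers : List Int) : List Int :=
  let sc := pvLoopA answers 0 (0, 0, 0)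
  -- max(score) on the nonempty 3-element list
  let m := (PySem.List.max? [sc.1, sc.2.1, sc.2.2] (fun x => x)).getD 0
  pvResLoop [(0, sc.1), (1, sc.2.1), (2, sc.2.2)] m []

-- ===== PORT B =====
-- Counter((i % 40, a) for i, a in enumerate(answers)) is PySem.Dict.counter of the
-- mapped enumerate list; cnt[(r, pat[r % len(pat)])] is getD … 0 (Counter's default).
def solution_alt (answers : List Int) : List Int :=
  let pats := [pvFirstStudent, pvSecondStudent, pvThirdStudent]
  let cnt := PySem.Dict.counter
    ((PySem.List.enumerate answers 0).map (fun p => (PySem.Int.mod p.1 40, p.2)))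
  let score := pats.map (fun pat =>
    ((PySem.List.pyRange 0 40 1).map (fun r =>
      cnt.getD (r, PySem.List.pyGetD pat (PySem.Int.mod r (pat.length : Int)) 0) 0)).sum)
  let best := (PySem.List.max? score (fun x => x)).getD 0
  (PySem.List.enumerate score 0).filterMap
    (fun (p : Int × Int) => if p.2 = best then some (p.1 + 1) else none)

-- ===== PRECONDITION & SPEC =====
def Spec_solution (answers : List Int) (out : List Int) : Prop := out = solution_alt answers
instance (answers : List Int) (out : List Int) : Decidable (Spec_solution answers out) := by unfold Spec_solution; infer_instance

-- ===== CLAIM (what is proved, stated in full; the proofs are below) =====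
def Claim_equal_solution : Prop := ∀ (answers : List Int), Dom_solution answers → Spec_solution answers (solution answers)

-- ===== LEMMAS AND PROOFS =====

-- the per-pattern count starting at index `idx`, the common denominator of both ports
def pvCnt (pat : List Int) : Nat → List Int → Int
  | _, [] => 0
  | idx, a :: rest =>
      (if a = pat.getD (idx % pat.length) 0 then 1 else 0) + pvCnt pat (idx + 1) rest

theorem pvLoopA_eq (answers : List Int) :
    ∀ (idx : Nat) (s1 s2 s3 : Int),
      pvLoopA answers idx (s1, s2, s3) =
        (s1 + pvCnt pvFirstStudent idx answers,
         s2 + pvCnt pvSecondStudent idx answers,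
         s3 + pvCnt pvThirdStudent idx answers) := by
  induction answers with
  | nil => intro idx s1 s2 s3; simp [pvLoopA, pvCnt]
  | cons a rest ih =>
      intro idx s1 s2 s3
      simp only [pvLoopA, pvCnt, ih]
      split_ifs <;> simp only [Prod.mk.injEq] <;> refine ⟨by omega, by omega, by omega⟩

-- summing the indicator "p = (r, g r)" over range(a, b) picks out at most the term r = p.1
theorem pvIndSum (g : Int → Int) (p : Int × Int) : ∀ (a b : Int),
    ((PySem.List.pyRange a b 1).map (fun r => (if p = (r, g r) then (1 : Int) else 0))).sum
      = if a ≤ p.1 ∧ p.1 < b ∧ p.2 = g p.1 then 1 else 0 := by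
  intro a b
  by_cases hab : b ≤ a
  · rw [PySem.List.pyRange_one_eq_nil hab]
    simp only [List.map_nil, List.sum_nil]
    split_ifs with h
    · omega
    · rfl
  · push_neg at hab
    have hd : ((b - a).toNat) = (b - (a + 1)).toNat + 1 := by omega
    rw [PySem.List.pyRange_one_cons hab]
    simp only [List.map_cons, List.sum_cons]
    rw [pvIndSum g p (a + 1) b]
    rcases p with ⟨x, y⟩
    simp only [Prod.mk.injEq]
    split_ifs <;> simp_all <;> omega
termination_by a b => (b - a).toNat
decreasing_by omega

-- summing counts over range(a,b) = summing indicators over the list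
theorem pvSumCount (g : Int → Int) (a b : Int) :
    ∀ (l : List (Int × Int)),
    ((PySem.List.pyRange a b 1).map (fun r => ((l.count (r, g r) : Int)))).sum
      = (l.map (fun p => if a ≤ p.1 ∧ p.1 < b ∧ p.2 = g p.1 then (1 : Int) else 0)).sum := by
  intro l
  induction l with
  | nil => simp
  | cons p rest ih =>
      have hsplit :
          (fun r => (((p :: rest).count (r, g r) : Nat) : Int))
            = fun r => (rest.count (r, g r) : Int) + (if p = (r, g r) then 1 else 0) := by
        funext r
        rw [List.count_cons]
        split_ifs with h1 h2 h2
        · push_cast; ring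
        · simp_all
        · simp_all
        · push_cast; ring
      simp only [hsplit]
      rw [PySem.List.sum_map_add_int]
      rw [ih, pvIndSum g p a b]
      simp only [List.map_cons, List.sum_cons]
      ring

-- the histogram score of one pattern equals A's direct match count
theorem pvScore_eq (pat : List Int) (hdvd : pat.length ∣ 40) (hpos : 0 < pat.length)
    (answers : List Int) :
    ((PySem.List.pyRange 0 40 1).map (fun r =>
      (PySem.Dict.counter
        ((PySem.List.enumerate answers 0).map (fun p => (PySem.Int.mod p.1 40, p.2)))).getD
        (r, PySem.List.pyGetD pat (PySem.Int.mod r (pat.length : Int)) 0) 0)).sum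
      = pvCnt pat 0 answers := by
  simp only [PySem.Dict.getD_counter]
  rw [pvSumCount (fun r => PySem.List.pyGetD pat (PySem.Int.mod r (pat.length : Int)) 0) 0 40]
  rw [List.map_map]
  suffices h : ∀ (n : Nat),
      ((PySem.List.enumerate answers n).map
        ((fun p => if 0 ≤ p.1 ∧ p.1 < 40 ∧
              p.2 = PySem.List.pyGetD pat (PySem.Int.mod p.1 (pat.length : Int)) 0
            then (1 : Int) else 0) ∘
          fun p => (PySem.Int.mod p.1 40, p.2))).sum = pvCnt pat n answers by
    exact h 0
  intro n
  induction answers generalizing n with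
  | nil => simp [PySem.List.enumerate_nil, pvCnt]
  | cons a rest ih =>
      rw [PySem.List.enumerate_cons]
      simp only [List.map_cons, List.sum_cons, Function.comp]
      rw [show ((n : Int) + 1) = (((n + 1 : Nat)) : Int) by push_cast; ring, ih (n + 1)]
      have h0 : (0 : Int) ≤ PySem.Int.mod (n : Int) 40 := PySem.Int.mod_nonneg _ (by norm_num)
      have h40 : PySem.Int.mod (n : Int) 40 < 40 := PySem.Int.mod_lt _ (by norm_num)
      have hm : PySem.Int.mod ((n : Nat) : Int) 40 = ((n % 40 : Nat) : Int) :=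
        PySem.Int.mod_natCast n 40
      have hm2 : PySem.Int.mod (((n % 40 : Nat) : Int)) ((pat.length : Nat) : Int)
          = ((n % 40 % pat.length : Nat) : Int) := PySem.Int.mod_natCast _ _
      have hmm : n % 40 % pat.length = n % pat.length := Nat.mod_mod_of_dvd n hdvd
      simp only [hm] at *
      rw [hm2, hmm, PySem.List.pyGetD_natCast]
      have hlt : n % pat.length < pat.length := Nat.mod_lt _ hpos
      simp only [pvCnt, List.getD_eq_getElem?_getD]
      split_ifs with h1 h2 h2 <;> simp_all

-- ===== VERDICT (by name: the statement is the Claim_ definition above) =====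
theorem solution_spec : Claim_equal_solution := by
  intro answers _
  unfold Spec_solution solution solution_alt
  simp only [List.map_cons, List.map_nil,
    pvScore_eq pvFirstStudent (by decide) (by decide),
    pvScore_eq pvSecondStudent (by decide) (by decide),
    pvScore_eq pvThirdStudent (by decide) (by decide)]
  simp only [pvLoopA_eq, zero_add]
  generalize (PySem.List.max? [pvCnt pvFirstStudent 0 answers, pvCnt pvSecondStudent 0 answers,
      pvCnt pvThirdStudent 0 answers] (fun x => x)).getD 0 = m
  simp only [pvResLoop, PySem.List.enumerate_cons, PySem.List.enumerate_nil, List.filterMap]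
  split_ifs <;> rfl
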